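-- pv_equiv track=rewrite | github.com/kpercyro/MSE-433---Module-3-Warehousing | compare_solutions.py | kate_to_loading_order
-- ===== SOURCE A (Python) =====
-- def kate_to_loading_order(tote_seq, order_priority, belt_queues,
--                           tote_data_enriched):
--     """Convert Kate's tote sequence -> loading_order for ConveyorSim."""
--     first_orders = {}
--     for b in range(4):
--         if belt_queues[b]:
--             first_orders[belt_queues[b][0]] = b
--
--     loading_order = []
--     for tote in tote_seq:
--         if tote not in tote_data_enriched:
--             continue
--         items = sorted(tote_data_enriched[tote],
--                        key=lambda x: order_priority.index(x[0]))
--         for (order_id, item_type, qty) in items: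
--             if order_id in first_orders:
--                 belt = first_orders[order_id]
--                 for _ in range(qty):
--                     loading_order.append((item_type, belt))
--
--     return loading_order
-- ===== SOURCE B (Python) =====
-- def kate_to_loading_order(tote_seq, order_priority, belt_queues,
--                           tote_data_enriched):
--     """Sort-free: only the (at most 4) orders at the belt-queue fronts are ever
--     loaded, so precompute them once in priority order and build the whole result
--     with one flat comprehension instead of a stable sort per tote."""
--     first_orders = {belt_queues[b][0]: b for b in range(4) if belt_queues[b]}
--     active = [oid for oid in dict.fromkeys(order_priority)
--               if oid in first_orders]
--     return [(item_type, first_orders[oid])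
--             for tote in tote_seq
--             for items in ([tote_data_enriched[tote]]
--                           if tote in tote_data_enriched else [])
--             for oid in active
--             for (order_id, item_type, qty) in items
--             if order_id == oid
--             for _ in range(qty)]
-- ===== Notes on version B (the rewrite author's own statement) =====
-- stated objective: faster
-- what changed: B eliminates A's per-tote stable sort keyed by repeated order_priority.index scans: it precomputes once the (at most 4) belt-serving order ids in deduplicated priority order and builds the whole loading order as a single flat comprehension sweeping those orders per tote, with no sorting.
import Mathlib
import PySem

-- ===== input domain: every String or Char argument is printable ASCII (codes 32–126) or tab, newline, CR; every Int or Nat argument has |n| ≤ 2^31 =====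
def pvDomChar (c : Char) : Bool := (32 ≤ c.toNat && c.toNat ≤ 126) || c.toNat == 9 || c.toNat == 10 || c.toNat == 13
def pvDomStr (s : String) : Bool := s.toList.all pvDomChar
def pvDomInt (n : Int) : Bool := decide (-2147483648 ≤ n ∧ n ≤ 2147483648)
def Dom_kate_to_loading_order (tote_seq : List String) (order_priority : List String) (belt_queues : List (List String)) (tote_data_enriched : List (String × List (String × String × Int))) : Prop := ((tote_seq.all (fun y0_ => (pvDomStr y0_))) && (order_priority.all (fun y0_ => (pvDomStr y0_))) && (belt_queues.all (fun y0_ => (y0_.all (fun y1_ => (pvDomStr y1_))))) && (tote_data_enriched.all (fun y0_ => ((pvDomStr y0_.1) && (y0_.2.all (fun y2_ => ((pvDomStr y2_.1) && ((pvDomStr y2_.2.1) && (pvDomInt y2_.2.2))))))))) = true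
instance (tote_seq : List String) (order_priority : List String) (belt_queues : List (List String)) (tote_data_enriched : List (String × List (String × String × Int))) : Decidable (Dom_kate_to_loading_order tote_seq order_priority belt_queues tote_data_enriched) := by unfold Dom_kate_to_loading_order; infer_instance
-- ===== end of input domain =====

-- B drops A's per-tote stable sort (keyed by repeated order_priority.index scans): it precomputes the
-- ≤4 belt-serving order ids in priority order once and builds the result as one flat comprehension (faster).

-- ===== PORT A =====
-- first_orders = {}; for b in range(4): if belt_queues[b]: first_orders[belt_queues[b][0]] = b
-- (belt_queues[b] may raise IndexError: total form pyGetD used, exact under Pre_'s 4 ≤ belt_queues.length)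
def firstOrdersA (belt_queues : List (List String)) : PySem.Dict String Int :=
  (PySem.List.pyRange 0 4 1).foldl
    (fun fo b =>
      match PySem.List.pyGetD belt_queues b [] with
      | [] => fo
      | x :: _ => fo.insert x b)
    PySem.Dict.empty

-- key lambda x: order_priority.index(x[0]) — total form (index?).getD 0, exact under Pre_'s
-- membership condition (Python raises ValueError exactly where index? is none)
def kate_to_loading_order (tote_seq : List String) (order_priority : List String) (belt_queues : List (List String)) (tote_data_enriched : List (String × List (String × String × Int))) : List (String × Int) :=
  let first_orders := firstOrdersA belt_queues
  let d := PySem.Dict.ofList tote_data_enriched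
  tote_seq.foldl
    (fun acc tote =>
      if d.contains tote then
        (PySem.List.sorted (d.getD tote [])
            (fun x => (PySem.List.index? order_priority x.1).getD 0) false).foldl
          (fun acc2 it =>
            if first_orders.contains it.1 then
              let belt := first_orders.getD it.1 0
              (PySem.List.pyRange 0 it.2.2 1).foldl (fun acc3 _ => acc3 ++ [(it.2.1, belt)]) acc2
            else acc2)
          acc
      else acc)
    []

-- ===== PORT B =====
-- first_orders = {belt_queues[b][0]: b for b in range(4) if belt_queues[b]} — the same total
-- pyGetD form as in A's port for the possible IndexError, excluded by Pre_'s 4 ≤ belt_queues.length;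
-- 'for _ in range(qty)' copies of one pair = List.replicate qty.toNat (empty for qty < 0, exact)
def kate_to_loading_order_alt (tote_seq : List String) (order_priority : List String) (belt_queues : List (List String)) (tote_data_enriched : List (String × List (String × String × Int))) : List (String × Int) :=
  let first_orders : PySem.Dict String Int :=
    PySem.Dict.ofList ((PySem.List.pyRange 0 4 1).filterMap (fun b =>
      match PySem.List.pyGetD belt_queues b [] with
      | [] => none
      | x :: _ => some (x, b)))
  let active := (PySem.List.dedup order_priority).filter (fun oid => first_orders.contains oid)
  tote_seq.flatMap (fun tote =>
    match (PySem.Dict.ofList tote_data_enriched).get? tote with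
    | none => []
    | some items =>
      active.flatMap (fun oid =>
        items.flatMap (fun it =>
          if it.1 == oid then List.replicate it.2.2.toNat (it.2.1, first_orders.getD oid 0)
          else [])))

-- ===== PRECONDITION & SPEC =====
-- Pre_ excludes exactly the inputs where the Python A raises: an IndexError when belt_queues has
-- fewer than 4 belts, and a ValueError when an item of a tote that occurs in tote_seq and in
-- tote_data_enriched carries an order id absent from order_priority.
def Pre_kate_to_loading_order (tote_seq : List String) (order_priority : List String) (belt_queues : List (List String)) (tote_data_enriched : List (String × List (String × String × Int))) : Prop :=
  4 ≤ belt_queues.length ∧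
  ∀ tote ∈ tote_seq, ∀ it ∈ (PySem.Dict.ofList tote_data_enriched).getD tote [], it.1 ∈ order_priority
instance (tote_seq : List String) (order_priority : List String) (belt_queues : List (List String)) (tote_data_enriched : List (String × List (String × String × Int))) : Decidable (Pre_kate_to_loading_order tote_seq order_priority belt_queues tote_data_enriched) := by unfold Pre_kate_to_loading_order; infer_instance

def pvWitness_kate_to_loading_order : List String × List String × List (List String) × (List (String × List (String × String × Int))) :=
  (["t1", "t2"], ["o1", "o2"], [["o2"], ["o1"], [], []], [("t1", [("o1", "widgetA", 2), ("o2", "widgetB", 1)])])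

def Spec_kate_to_loading_order (tote_seq : List String) (order_priority : List String) (belt_queues : List (List String)) (tote_data_enriched : List (String × List (String × String × Int))) (out : List (String × Int)) : Prop := out = kate_to_loading_order_alt tote_seq order_priority belt_queues tote_data_enriched
instance (tote_seq : List String) (order_priority : List String) (belt_queues : List (List String)) (tote_data_enriched : List (String × List (String × String × Int))) (out : List (String × Int)) : Decidable (Spec_kate_to_loading_order tote_seq order_priority belt_queues tote_data_enriched out) := by unfold Spec_kate_to_loading_order; infer_instance

-- ===== CLAIM (what is proved, stated in full; the proofs are below) =====
def Claim_equal_kate_to_loading_order : Prop := ∀ (tote_seq : List String) (order_priority : List String) (belt_queues : List (List String)) (tote_data_enriched : List (String × List (String × String × Int))), Dom_kate_to_loading_order tote_seq order_priority belt_queues tote_data_enriched → Pre_kate_to_loading_order tote_seq order_priority belt_queues tote_data_enriched → Spec_kate_to_loading_order tote_seq order_priority belt_queues tote_data_enriched (kate_to_loading_order tote_seq order_priority belt_queues tote_data_enriched)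

-- ===== LEMMAS AND PROOFS =====

-- prioIdx P s: the total form of order_priority.index(s)
def prioIdx (P : List String) (s : String) : Nat := (PySem.List.index? P s).getD 0

lemma prioIdx_inj {P : List String} {a b : String} (ha : a ∈ P) (hb : b ∈ P)
    (h : prioIdx P a = prioIdx P b) : a = b := by
  have ha' := (List.isSome_idxOf? (l := P) (a := a)).2 ha
  have hb' := (List.isSome_idxOf? (l := P) (a := b)).2 hb
  obtain ⟨i, hi⟩ := Option.isSome_iff_exists.1 ha'
  obtain ⟨j, hj⟩ := Option.isSome_iff_exists.1 hb'
  simp [prioIdx, PySem.List.index?, hi, hj] at h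
  subst h
  obtain ⟨hlt, hget, -⟩ := List.idxOf?_eq_some_iff.1 hi
  obtain ⟨hlt', hget', -⟩ := List.idxOf?_eq_some_iff.1 hj
  rw [← hget, hget']

lemma prioIdx_cons {x : String} {xs : List String} {a : String} (ha : a ∈ xs) (hne : a ≠ x) :
    prioIdx (x :: xs) a = prioIdx xs a + 1 := by
  have ha' := (List.isSome_idxOf? (l := xs) (a := a)).2 ha
  obtain ⟨i, hi⟩ := Option.isSome_iff_exists.1 ha'
  have hxa : (x == a) = false := by simp [Ne.symm hne]
  simp [prioIdx, PySem.List.index?, List.idxOf?_cons, hi, hxa]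

lemma dedup_pairwise_prioIdx (P : List String) :
    (PySem.List.dedup P).Pairwise (fun a b => prioIdx P a < prioIdx P b) := by
  induction P with
  | nil => simp [PySem.List.dedup, PySem.Set.ofList]
  | cons x xs ih =>
    rw [PySem.List.dedup, PySem.Set.ofList_cons]
    constructor
    · intro b hb
      have hbmem : b ∈ PySem.Set.ofList xs := (List.mem_filter.1 hb).1
      have hbne : b ≠ x := by
        have := (List.mem_filter.1 hb).2; simp [PySem.Set.discard] at hb ⊢
        exact hb.2
      have hbxs : b ∈ xs := (PySem.Set.mem_ofList _ _).1 hbmem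
      have h0 : prioIdx (x :: xs) x = 0 := by simp [prioIdx, PySem.List.index?, List.idxOf?_cons]
      rw [h0, prioIdx_cons hbxs hbne]; omega
    · have hfil : (PySem.Set.ofList xs).discard x = (PySem.Set.ofList xs).filter (fun y => !y == x) := rfl
      rw [hfil]
      have := (ih.filter (fun y => !(y == x)))
      refine List.Pairwise.imp_of_mem ?_ this
      intro a b hamem hbmem hab
      have haxs : a ∈ xs := (PySem.Set.mem_ofList _ _).1 (List.mem_filter.1 hamem).1
      have hbxs : b ∈ xs := (PySem.Set.mem_ofList _ _).1 (List.mem_filter.1 hbmem).1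
      have hane : a ≠ x := by have := (List.mem_filter.1 hamem).2; simpa using this
      have hbne : b ≠ x := by have := (List.mem_filter.1 hbmem).2; simpa using this
      rw [prioIdx_cons haxs hane, prioIdx_cons hbxs hbne]; omega

lemma insertBy_cons {α : Type} (bf : α → α → Bool) (x y : α) (ys : List α) :
    PySem.List.insertBy bf x (y :: ys) =
      if bf x y then x :: y :: ys else y :: PySem.List.insertBy bf x ys := by
  simp [PySem.List.insertBy]

lemma insertBy_append {α : Type} (bf : α → α → Bool) (x : α) (l1 l2 : List α)
    (h : ∀ y ∈ l1, bf x y = false) :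
    PySem.List.insertBy bf x (l1 ++ l2) = l1 ++ PySem.List.insertBy bf x l2 := by
  induction l1 with
  | nil => simp
  | cons y ys ih =>
    have hy : bf x y = false := h y (by simp)
    simp only [List.cons_append, insertBy_cons, hy, Bool.false_eq_true, ite_false]
    rw [ih (fun z hz => h z (by simp [hz]))]

lemma insertBy_all_true {α : Type} (bf : α → α → Bool) (x : α) (l : List α)
    (h : ∀ y ∈ l, bf x y = true) :
    PySem.List.insertBy bf x l = x :: l := by
  cases l with
  | nil => rfl
  | cons y ys => simp [insertBy_cons, h y (by simp)]

lemma sorted_eq_flatMap_groups {α : Type} (key : α → Nat) (ks : List Nat)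
    (hks : ks.Pairwise (· < ·)) (xs : List α) (hxs : ∀ y ∈ xs, key y ∈ ks) :
    PySem.List.sorted xs key false = ks.flatMap (fun k => xs.filter (fun y => key y == k)) := by
  induction xs using List.reverseRecOn with
  | nil => simp [PySem.List.sorted]
  | append_singleton xs x ih =>
    have hxks : key x ∈ ks := hxs x (by simp)
    have hxs' : ∀ y ∈ xs, key y ∈ ks := fun y hy => hxs y (by simp [hy])
    obtain ⟨s, t, rfl⟩ := List.append_of_mem hxks
    have hst := (List.pairwise_append.1 hks)
    have hs_lt : ∀ a ∈ s, a < key x := fun a ha => hst.2.2 a ha (key x) (by simp)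
    have ht_gt : ∀ b ∈ t, key x < b := (List.pairwise_cons.1 hst.2.1).1
    have hs_ne : ∀ a ∈ s, key x ≠ a := fun a ha => by have := hs_lt a ha; omega
    have ht_ne : ∀ b ∈ t, key x ≠ b := fun b hb => by have := ht_gt b hb; omega
    have hstep : PySem.List.sorted (xs ++ [x]) key false =
        PySem.List.insertBy (fun a b => decide (key a < key b)) x (PySem.List.sorted xs key false) := by
      rw [PySem.List.sorted_eq_foldl_insertBy, PySem.List.sorted_eq_foldl_insertBy,
        List.foldl_append]
      rfl
    rw [hstep, ih hxs']
    rw [List.flatMap_append, List.flatMap_cons]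
    rw [show s.flatMap (fun k => xs.filter (fun y => key y == k)) ++
          (xs.filter (fun y => key y == key x) ++
            t.flatMap (fun k => xs.filter (fun y => key y == k)))
        = (s.flatMap (fun k => xs.filter (fun y => key y == k)) ++
            xs.filter (fun y => key y == key x)) ++
            t.flatMap (fun k => xs.filter (fun y => key y == k)) by simp [List.append_assoc]]
    rw [insertBy_append _ _ _ _ (by
      intro y hy
      rcases List.mem_append.1 hy with hy | hy
      · obtain ⟨k, hk, hyk⟩ := List.mem_flatMap.1 hy
        have : key y = k := by simpa using (List.mem_filter.1 hyk).2
        have := hs_lt k hk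
        simp; omega
      · have : key y = key x := by simpa using (List.mem_filter.1 hy).2
        simp; omega)]
    rw [insertBy_all_true _ _ _ (by
      intro y hy
      obtain ⟨k, hk, hyk⟩ := List.mem_flatMap.1 hy
      have : key y = k := by simpa using (List.mem_filter.1 hyk).2
      have := ht_gt k hk
      simp; omega)]
    rw [List.flatMap_append, List.flatMap_cons]
    have hGs : s.flatMap (fun k => (xs ++ [x]).filter (fun y => key y == k)) =
        s.flatMap (fun k => xs.filter (fun y => key y == k)) := by
      apply List.flatMap_congr
      intro k hk
      rw [List.filter_append]
      have : (key x == k) = false := by simpa using hs_ne k hk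
      simp [this]
    have hGt : t.flatMap (fun k => (xs ++ [x]).filter (fun y => key y == k)) =
        t.flatMap (fun k => xs.filter (fun y => key y == k)) := by
      apply List.flatMap_congr
      intro k hk
      rw [List.filter_append]
      have : (key x == k) = false := by simpa using ht_ne k hk
      simp [this]
    have hGx : (xs ++ [x]).filter (fun y => key y == key x) =
        xs.filter (fun y => key y == key x) ++ [x] := by
      rw [List.filter_append]; simp
    rw [hGs, hGt, hGx]
    simp [List.append_assoc]

lemma flatMap_ite {α β : Type} (p : α → Bool) (g : α → List β) (l : List α) :
    l.flatMap (fun x => if p x then g x else []) = (l.filter p).flatMap g := by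
  induction l with
  | nil => rfl
  | cons x xs ih =>
    by_cases hx : p x = true
    · simp [hx, ih]
    · simp only [Bool.not_eq_true] at hx
      simp [hx, ih]

-- a foldl that skips 'none' steps equals an insert-foldl over the filterMap
lemma foldl_insert_filterMap {α : Type} (g : α → Option (String × Int)) (l : List α)
    (d : PySem.Dict String Int) :
    (l.filterMap g).foldl (fun d kv => d.insert kv.1 kv.2) d =
    l.foldl (fun d b => match g b with | none => d | some kv => d.insert kv.1 kv.2) d := by
  induction l generalizing d with
  | nil => rfl
  | cons b bs ih =>
    cases hg : g b with
    | none => simp [hg, ih]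
    | some kv => simp [hg, ih]

-- the two first_orders prologues build the same dict
lemma firstOrders_eq (belt_queues : List (List String)) :
    PySem.Dict.ofList ((PySem.List.pyRange 0 4 1).filterMap (fun b =>
      match PySem.List.pyGetD belt_queues b [] with
      | [] => none
      | x :: _ => some (x, b))) = firstOrdersA belt_queues := by
  have hof : ∀ (ps : List (String × Int)), PySem.Dict.ofList ps =
      ps.foldl (fun d kv => d.insert kv.1 kv.2) PySem.Dict.empty := by
    intro ps
    induction ps with
    | nil => rfl
    | cons p ps ih => rfl
  rw [hof, foldl_insert_filterMap]
  unfold firstOrdersA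
  apply PySem.List.foldl_congr_mem'
  intro b _ d
  cases PySem.List.pyGetD belt_queues b [] with
  | nil => rfl
  | cons x xs => rfl

-- the per-tote bodies agree: emitting the priority-sorted items equals sweeping the active orders
lemma tote_core (P : List String) (fo : PySem.Dict String Int)
    (items : List (String × String × Int)) (hitems : ∀ it ∈ items, it.1 ∈ P)
    (acc : List (String × Int)) :
    (PySem.List.sorted items (fun x => (PySem.List.index? P x.1).getD 0) false).foldl
      (fun acc2 it =>
        if fo.contains it.1 then
          (PySem.List.pyRange 0 it.2.2 1).foldl (fun acc3 _ => acc3 ++ [(it.2.1, fo.getD it.1 0)]) acc2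
        else acc2) acc
    = acc ++ ((PySem.List.dedup P).filter (fun oid => fo.contains oid)).flatMap
        (fun oid => items.flatMap (fun it =>
          if it.1 == oid then List.replicate it.2.2.toNat (it.2.1, fo.getD oid 0) else [])) := by
  set gA : String × String × Int → List (String × Int) :=
    fun it => List.replicate it.2.2.toNat (it.2.1, fo.getD it.1 0) with hgA
  -- Step 1: the A side is acc ++ flatMap over the sorted items
  have hA : (PySem.List.sorted items (fun x => (PySem.List.index? P x.1).getD 0) false).foldl
      (fun acc2 it =>
        if fo.contains it.1 then
          (PySem.List.pyRange 0 it.2.2 1).foldl (fun acc3 _ => acc3 ++ [(it.2.1, fo.getD it.1 0)]) acc2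
        else acc2) acc
      = acc ++ (PySem.List.sorted items (fun x => (PySem.List.index? P x.1).getD 0) false).flatMap
          (fun it => if fo.contains it.1 then gA it else []) := by
    rw [← PySem.List.foldl_append_eq_flatMap]
    apply PySem.List.foldl_congr_mem'
    intro it _ acc2
    by_cases hc : fo.contains it.1 = true
    · simp only [hc, if_true]
      rw [PySem.List.foldl_append_singleton_eq_map]
      congr 1
      rw [List.map_const', PySem.List.length_pyRange_one]
      simp [hgA]
    · simp only [Bool.not_eq_true] at hc
      simp [hc]
  rw [hA]
  congr 1
  -- Step 2: the sorted list is the concatenation of the per-order groups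
  have hsorted : PySem.List.sorted items (fun x => (PySem.List.index? P x.1).getD 0) false
      = (PySem.List.dedup P).flatMap (fun oid => items.filter (fun y => y.1 == oid)) := by
    have hgroups := sorted_eq_flatMap_groups (fun x => prioIdx P x.1)
      ((PySem.List.dedup P).map (prioIdx P))
      (by
        rw [List.pairwise_map]
        exact dedup_pairwise_prioIdx P)
      items
      (by
        intro y hy
        exact List.mem_map_of_mem ((PySem.Set.mem_ofList P y.1).2 (hitems y hy)))
    rw [show (fun x : String × String × Int => (PySem.List.index? P x.1).getD 0)
          = fun x => prioIdx P x.1 from rfl]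
    rw [hgroups, List.flatMap_map]
    apply List.flatMap_congr
    intro oid hoid
    apply List.filter_congr
    intro y hy
    have hyP : y.1 ∈ P := hitems y hy
    have hoidP : oid ∈ P := (PySem.Set.mem_ofList P oid).1 hoid
    by_cases he : y.1 = oid
    · simp [he]
    · have : prioIdx P y.1 ≠ prioIdx P oid := fun h => he (prioIdx_inj hyP hoidP h)
      simp [he, this]
  rw [hsorted]
  -- Step 3: the B side, dropping the filters into the groups
  rw [← flatMap_ite (fun oid => fo.contains oid)
      (fun oid => items.flatMap (fun it =>
        if it.1 == oid then List.replicate it.2.2.toNat (it.2.1, fo.getD oid 0) else []))]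
  rw [List.flatMap_assoc]
  apply List.flatMap_congr
  intro oid _
  by_cases hc : fo.contains oid = true
  · rw [flatMap_ite (fun it => it.1 == oid)
        (fun it => List.replicate it.2.2.toNat (it.2.1, fo.getD oid 0)) items]
    simp only [hc, if_true]
    apply List.flatMap_congr
    intro it hit
    have he : it.1 = oid := by simpa using (List.mem_filter.1 hit).2
    simp [hgA, he, hc]
  · simp only [Bool.not_eq_true] at hc
    have : ∀ it ∈ items.filter (fun y => y.1 == oid), (fun it =>
        if fo.contains it.1 then gA it else []) it = ([] : List (String × Int)) := by
      intro it hit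
      have he : it.1 = oid := by simpa using (List.mem_filter.1 hit).2
      simp [he, hc]
    rw [List.flatMap_congr this]
    simp [hc]

-- ===== VERDICT (by name: the statement is the Claim_ definition above) =====
theorem kate_to_loading_order_spec : Claim_equal_kate_to_loading_order := by
  intro tote_seq P belt_queues td _dom hpre
  obtain ⟨hlen, hmem⟩ := hpre
  show kate_to_loading_order _ _ _ _ = kate_to_loading_order_alt _ _ _ _
  unfold kate_to_loading_order kate_to_loading_order_alt
  rw [firstOrders_eq belt_queues]
  rw [show (tote_seq.flatMap fun tote =>
        match (PySem.Dict.ofList td).get? tote with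
        | none => []
        | some items =>
          ((PySem.List.dedup P).filter (fun oid => (firstOrdersA belt_queues).contains oid)).flatMap
            (fun oid => items.flatMap (fun it =>
              if it.1 == oid then List.replicate it.2.2.toNat (it.2.1, (firstOrdersA belt_queues).getD oid 0)
              else [])))
      = [] ++ tote_seq.flatMap fun tote =>
        match (PySem.Dict.ofList td).get? tote with
        | none => []
        | some items =>
          ((PySem.List.dedup P).filter (fun oid => (firstOrdersA belt_queues).contains oid)).flatMap
            (fun oid => items.flatMap (fun it =>
              if it.1 == oid then List.replicate it.2.2.toNat (it.2.1, (firstOrdersA belt_queues).getD oid 0)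
              else [])) from (List.nil_append _).symm]
  rw [← PySem.List.foldl_append_eq_flatMap]
  apply PySem.List.foldl_congr_mem'
  intro tote htote acc
  rcases hd : (PySem.Dict.ofList td).get? tote with _ | items
  · simp [PySem.Dict.contains_eq_isSome_get?, hd]
  · have hcont : (PySem.Dict.ofList td).contains tote = true := by
      rw [PySem.Dict.contains_eq_isSome_get?, hd]; rfl
    have hgetD : (PySem.Dict.ofList td).getD tote [] = items :=
      PySem.Dict.getD_of_get?_eq_some _ _ hd
    simp only [hcont, if_true, hgetD]
    exact tote_core P _ items (fun it hit => hmem tote htote it (hgetD ▸ hit)) acc
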